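-- pv_equiv track=rewrite | github.com/joie-zhang/bargain | ui/game1_sample_viewer.py | conversation_logs_by_round
-- ===== SOURCE A (Python) =====
-- from collections import defaultdict
-- from typing import Any, Dict, List, Optional, Tuple
--
-- def conversation_logs_by_round(
--     results: Dict[str, Any]
-- ) -> Dict[int, List[Dict[str, Any]]]:
--     grouped: Dict[int, List[Dict[str, Any]]] = defaultdict(list)
--     for entry in results.get("conversation_logs", []):
--         round_num = int(entry.get("round") or 0)
--         grouped[round_num].append(entry)
--     return dict(sorted(grouped.items()))
-- ===== SOURCE B (Python) =====
-- from itertools import groupby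
--
--
-- def conversation_logs_by_round(results):
--     round_key = lambda entry: int(entry.get("round") or 0)
--     ordered = sorted(results.get("conversation_logs", []), key=round_key)
--     return {k: list(g) for k, g in groupby(ordered, key=round_key)}
-- ===== Notes on version B (the rewrite author's own statement) =====
-- stated objective: alternative
-- what changed: Replaces A's hash-group-then-sort-the-distinct-keys (defaultdict + sorted(items)) with a sort-first decomposition: stably sort all entries by round key once, then collect each round's entries in a single sequential groupby pass.
import Mathlib
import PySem

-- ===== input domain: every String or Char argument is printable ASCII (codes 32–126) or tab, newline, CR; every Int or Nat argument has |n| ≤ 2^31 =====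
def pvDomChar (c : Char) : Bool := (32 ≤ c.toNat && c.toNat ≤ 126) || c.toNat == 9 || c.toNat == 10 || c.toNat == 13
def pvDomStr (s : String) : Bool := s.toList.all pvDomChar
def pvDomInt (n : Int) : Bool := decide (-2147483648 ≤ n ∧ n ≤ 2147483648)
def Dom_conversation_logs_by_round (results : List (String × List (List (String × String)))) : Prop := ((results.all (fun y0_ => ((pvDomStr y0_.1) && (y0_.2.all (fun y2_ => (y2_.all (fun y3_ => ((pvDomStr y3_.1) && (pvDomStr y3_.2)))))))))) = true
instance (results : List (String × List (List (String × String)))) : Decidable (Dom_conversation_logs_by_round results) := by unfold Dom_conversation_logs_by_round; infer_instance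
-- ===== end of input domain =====

-- B groups by sorting all entries once (stable) and collecting runs, instead of
-- hash-grouping and then sorting the distinct keys; same return value, different decomposition.

-- ===== PORT A =====
-- round_num = int(entry.get("round") or 0): '' (the only falsy str) and a missing key
-- give 0.  Shared by both ports — the identical Python expression appears in A and B.
-- The '.getD 0' arm is never reached under Pre_ (Python's int() raises there).
def pyRoundKey (entry : List (String × String)) : Int :=
  match entry.lookup "round" with
  | none => 0
  | some s => if s = "" then 0 else (PySem.Int.ofStr? s).getD 0

def conversation_logs_by_round (results : List (String × List (List (String × String)))) : List (Int × List (List (String × String))) :=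
  let logs := (results.lookup "conversation_logs").getD []
  let grouped := logs.foldl (fun d e => d.modify (pyRoundKey e) [] (fun v => v ++ [e])) PySem.Dict.empty
  -- dict(sorted(grouped.items())): the keys are distinct, so Python's tuple
  -- comparison only ever compares first components — exact as key = fst.
  PySem.List.sorted grouped.items (fun p => p.1) false

-- ===== PORT B =====
-- itertools.groupby over the key-sorted list: one sequential pass collecting runs.
def groupRuns : List (List (String × String)) → List (Int × List (List (String × String)))
  | [] => []
  | e :: rest =>
      (pyRoundKey e, e :: rest.takeWhile (fun e' => pyRoundKey e' == pyRoundKey e)) ::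
        groupRuns (rest.dropWhile (fun e' => pyRoundKey e' == pyRoundKey e))
termination_by l => l.length
decreasing_by
  exact Nat.lt_succ_of_le (List.length_dropWhile_le _ _)

def conversation_logs_by_round_alt (results : List (String × List (List (String × String)))) : List (Int × List (List (String × String))) :=
  let logs := (results.lookup "conversation_logs").getD []
  groupRuns (PySem.List.sorted logs pyRoundKey false)

-- ===== PRECONDITION & SPEC =====
-- Pre_ excludes exactly the inputs where Python's int() raises ValueError in A:
-- an entry whose "round" value is a non-empty string that does not parse as an int.
def Pre_conversation_logs_by_round (results : List (String × List (List (String × String)))) : Prop :=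
  (((results.lookup "conversation_logs").getD []).all (fun e =>
    match e.lookup "round" with
    | none => true
    | some s => s == "" || (PySem.Int.ofStr? s).isSome)) = true
instance (results : List (String × List (List (String × String)))) : Decidable (Pre_conversation_logs_by_round results) := by unfold Pre_conversation_logs_by_round; infer_instance

def pvWitness_conversation_logs_by_round : (List (String × List (List (String × String)))) :=
  [("conversation_logs", [[("round", "2"), ("who", "a")], [("round", "1")], [("who", "b")], [("round", "2"), ("who", "c")]])]

def Spec_conversation_logs_by_round (results : List (String × List (List (String × String)))) (out : List (Int × List (List (String × String)))) : Prop := out = conversation_logs_by_round_alt results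
instance (results : List (String × List (List (String × String)))) (out : List (Int × List (List (String × String)))) : Decidable (Spec_conversation_logs_by_round results out) := by unfold Spec_conversation_logs_by_round; infer_instance

-- ===== CLAIM (what is proved, stated in full; the proofs are below) =====
def Claim_equal_conversation_logs_by_round : Prop := ∀ (results : List (String × List (List (String × String)))), Dom_conversation_logs_by_round results → Pre_conversation_logs_by_round results → Spec_conversation_logs_by_round results (conversation_logs_by_round results)

-- ===== LEMMAS AND PROOFS =====

theorem pv_dropWhile_head {α : Type} (p : α → Bool) : ∀ (l : List α) (y : α) (ys : List α), l.dropWhile p = y :: ys → p y = false := by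
  intro l
  induction l with
  | nil => intro y ys h; simp [List.dropWhile] at h
  | cons a l ih =>
    intro y ys h
    by_cases hp : p a
    · rw [List.dropWhile_cons_of_pos hp] at h; exact ih _ _ h
    · rw [List.dropWhile_cons_of_neg hp] at h
      cases h; simpa using hp

theorem pv_insertBy_filter (acc : List (List (String × String))) (x : List (String × String)) (k : Int)
    (h : acc.Pairwise (fun a b => pyRoundKey a ≤ pyRoundKey b)) :
    (PySem.List.insertBy (fun a b => decide (pyRoundKey a < pyRoundKey b)) x acc).filter
        (fun e => pyRoundKey e == k)
      = acc.filter (fun e => pyRoundKey e == k) ++ (if pyRoundKey x == k then [x] else []) := by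
  induction acc with
  | nil => by_cases hk : pyRoundKey x = k <;> simp [PySem.List.insertBy, hk]
  | cons y ys ih =>
    rw [List.pairwise_cons] at h
    obtain ⟨h1, h2⟩ := h
    by_cases hb : pyRoundKey x < pyRoundKey y
    · have : PySem.List.insertBy (fun a b => decide (pyRoundKey a < pyRoundKey b)) x (y :: ys)
          = x :: y :: ys := by simp [PySem.List.insertBy, hb]
      rw [this]
      by_cases hk : pyRoundKey x = k
      · have hnil : (y :: ys).filter (fun e => pyRoundKey e == k) = [] := by
          rw [List.filter_eq_nil_iff]
          intro z hz
          have hyz : pyRoundKey y ≤ pyRoundKey z := by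
            rcases List.mem_cons.mp hz with rfl | hz'
            · exact le_refl _
            · exact h1 z hz'
          have : k < pyRoundKey z := by omega
          simp only [beq_iff_eq]
          omega
        simp [hk, hnil]
      · have hxk : (pyRoundKey x == k) = false := by simp [hk]
        simp [List.filter_cons, hxk]
    · have : PySem.List.insertBy (fun a b => decide (pyRoundKey a < pyRoundKey b)) x (y :: ys)
          = y :: PySem.List.insertBy (fun a b => decide (pyRoundKey a < pyRoundKey b)) x ys := by
        simp [PySem.List.insertBy, hb]
      rw [this]
      rw [List.filter_cons, List.filter_cons, ih h2]
      by_cases hy : pyRoundKey y == k <;> simp [hy]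

-- stability of Python's sort: each key class keeps its original order
theorem pv_sorted_filter (logs : List (List (String × String))) (k : Int) :
    (PySem.List.sorted logs pyRoundKey false).filter (fun e => pyRoundKey e == k)
      = logs.filter (fun e => pyRoundKey e == k) := by
  induction logs using List.reverseRecOn with
  | nil => rw [PySem.List.sorted_eq_foldl_insertBy]; rfl
  | append_singleton xs x ih =>
    rw [PySem.List.sorted_eq_foldl_insertBy, List.foldl_append, ← PySem.List.sorted_eq_foldl_insertBy]
    simp only [List.foldl_cons, List.foldl_nil]
    rw [pv_insertBy_filter _ _ _ (PySem.List.sorted_pairwise xs pyRoundKey)]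
    rw [ih, List.filter_append]
    by_cases hx : pyRoundKey x == k <;> simp [hx]

theorem pv_groupRuns_char_aux (n : Nat) : ∀ (s : List (List (String × String))), s.length ≤ n →
    s.Pairwise (fun a b => pyRoundKey a ≤ pyRoundKey b) →
    (∀ p ∈ groupRuns s, p.2 = s.filter (fun e => pyRoundKey e == p.1)) ∧
    ((groupRuns s).Pairwise (fun a b => a.1 < b.1)) ∧
    (∀ k, k ∈ (groupRuns s).map Prod.fst ↔ k ∈ s.map pyRoundKey) := by
  induction n with
  | zero =>
    intro s hs _
    have : s = [] := List.eq_nil_of_length_eq_zero (Nat.le_zero.mp hs)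
    subst this
    simp [groupRuns]
  | succ n ih =>
    intro s hs h
    match s with
    | [] => simp [groupRuns]
    | e :: rest =>
      rw [List.pairwise_cons] at h
      obtain ⟨he, hrest⟩ := h
      have hgr : groupRuns (e :: rest)
          = (pyRoundKey e, e :: rest.takeWhile (fun e' => pyRoundKey e' == pyRoundKey e)) ::
              groupRuns (rest.dropWhile (fun e' => pyRoundKey e' == pyRoundKey e)) := by
        rw [groupRuns]
      have hrun : ∀ z ∈ rest.takeWhile (fun e' => pyRoundKey e' == pyRoundKey e),
          pyRoundKey z = pyRoundKey e := by
        intro z hz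
        have := List.mem_takeWhile_imp hz
        simpa using this
      have hdropSub : (rest.dropWhile (fun e' => pyRoundKey e' == pyRoundKey e)).Sublist rest :=
        List.dropWhile_sublist _
      have hdropPair : (rest.dropWhile (fun e' => pyRoundKey e' == pyRoundKey e)).Pairwise
          (fun a b => pyRoundKey a ≤ pyRoundKey b) := hrest.sublist hdropSub
      have hgt : ∀ z ∈ rest.dropWhile (fun e' => pyRoundKey e' == pyRoundKey e),
          pyRoundKey e < pyRoundKey z := by
        cases hd : rest.dropWhile (fun e' => pyRoundKey e' == pyRoundKey e) with
        | nil => simp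
        | cons y ys =>
          have hyP := pv_dropWhile_head _ rest y ys hd
          have hymem : y ∈ rest := hdropSub.mem (by rw [hd]; exact List.mem_cons_self)
          have hyne : pyRoundKey y ≠ pyRoundKey e := by simpa using hyP
          have hylt : pyRoundKey e < pyRoundKey y :=
            lt_of_le_of_ne (he y hymem) (Ne.symm hyne)
          intro z hz
          rcases List.mem_cons.mp hz with rfl | hz'
          · exact hylt
          · have hpc := hdropPair
            rw [hd, List.pairwise_cons] at hpc
            exact lt_of_lt_of_le hylt (hpc.1 z hz')
      have hlen : (rest.dropWhile (fun e' => pyRoundKey e' == pyRoundKey e)).length ≤ n :=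
        le_trans (List.length_dropWhile_le _ _) (Nat.le_of_succ_le_succ hs)
      obtain ⟨ih1, ih2, ih3⟩ := ih _ hlen hdropPair
      -- key of every tail pair is a key of the dropped suffix, hence > pyRoundKey e
      have htailkey : ∀ p ∈ groupRuns (rest.dropWhile (fun e' => pyRoundKey e' == pyRoundKey e)),
          pyRoundKey e < p.1 := by
        intro p hp
        have : p.1 ∈ (rest.dropWhile (fun e' => pyRoundKey e' == pyRoundKey e)).map pyRoundKey :=
          (ih3 p.1).mp (List.mem_map_of_mem hp)
        obtain ⟨z, hz, hzk⟩ := List.mem_map.mp this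
        exact hzk ▸ hgt z hz
      have hsplit : rest.takeWhile (fun e' => pyRoundKey e' == pyRoundKey e)
          ++ rest.dropWhile (fun e' => pyRoundKey e' == pyRoundKey e) = rest :=
        List.takeWhile_append_dropWhile
      -- filtering at the head key collects exactly the head run
      have hfilt0 : (e :: rest).filter (fun x => pyRoundKey x == pyRoundKey e)
          = e :: rest.takeWhile (fun e' => pyRoundKey e' == pyRoundKey e) := by
        have h1 : (rest.takeWhile (fun e' => pyRoundKey e' == pyRoundKey e)).filter
            (fun x => pyRoundKey x == pyRoundKey e)
            = rest.takeWhile (fun e' => pyRoundKey e' == pyRoundKey e) := by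
          rw [List.filter_eq_self]
          intro z hz; simp [hrun z hz]
        have h2 : (rest.dropWhile (fun e' => pyRoundKey e' == pyRoundKey e)).filter
            (fun x => pyRoundKey x == pyRoundKey e) = [] := by
          rw [List.filter_eq_nil_iff]
          intro z hz
          have := hgt z hz
          simp only [beq_iff_eq]
          omega
        rw [List.filter_cons]
        simp only [beq_self_eq_true, if_pos]
        conv_lhs => rw [← hsplit]
        rw [List.filter_append, h1, h2, List.append_nil]
      -- filtering at any larger key skips the head and its run
      have hfiltGT : ∀ k', pyRoundKey e < k' →
          (e :: rest).filter (fun x => pyRoundKey x == k')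
            = (rest.dropWhile (fun e' => pyRoundKey e' == pyRoundKey e)).filter
                (fun x => pyRoundKey x == k') := by
        intro k' hk'
        have h1 : (rest.takeWhile (fun e' => pyRoundKey e' == pyRoundKey e)).filter
            (fun x => pyRoundKey x == k') = [] := by
          rw [List.filter_eq_nil_iff]
          intro z hz
          have := hrun z hz
          simp only [beq_iff_eq]
          omega
        rw [List.filter_cons]
        have hek : (pyRoundKey e == k') = false := by simp; omega
        rw [if_neg (by simp [hek])]
        conv_lhs => rw [← hsplit]
        rw [List.filter_append, h1, List.nil_append]
      refine ⟨?_, ?_, ?_⟩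
      · intro p hp
        rw [hgr] at hp
        rcases List.mem_cons.mp hp with rfl | hp'
        · exact hfilt0.symm
        · rw [ih1 p hp', hfiltGT p.1 (htailkey p hp')]
      · rw [hgr, List.pairwise_cons]
        exact ⟨fun q hq => htailkey q hq, ih2⟩
      · intro k
        rw [hgr]
        simp only [List.map_cons, List.mem_cons, ih3]
        constructor
        · rintro (rfl | hk)
          · exact Or.inl rfl
          · right
            exact (hdropSub.map pyRoundKey).mem hk
        · rintro (rfl | hk)
          · exact Or.inl rfl
          · rw [← hsplit, List.map_append, List.mem_append] at hk
            rcases hk with hk | hk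
            · obtain ⟨z, hz, hzk⟩ := List.mem_map.mp hk
              exact Or.inl (by rw [← hzk, hrun z hz])
            · exact Or.inr hk

theorem pv_groupRuns_char (s : List (List (String × String)))
    (h : s.Pairwise (fun a b => pyRoundKey a ≤ pyRoundKey b)) :
    (∀ p ∈ groupRuns s, p.2 = s.filter (fun e => pyRoundKey e == p.1)) ∧
    ((groupRuns s).Pairwise (fun a b => a.1 < b.1)) ∧
    (∀ k, k ∈ (groupRuns s).map Prod.fst ↔ k ∈ s.map pyRoundKey) :=
  pv_groupRuns_char_aux s.length s (le_refl _) h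

theorem pv_items_eq (logs : List (List (String × String))) :
    (logs.foldl (fun d e => d.modify (pyRoundKey e) [] (fun v => v ++ [e])) PySem.Dict.empty).items
      = (PySem.Set.ofList (logs.map pyRoundKey)).map
          (fun k => (k, logs.filter (fun e => pyRoundKey e == k))) := by
  have hnodup : (logs.foldl (fun d e => d.modify (pyRoundKey e) [] (fun v => v ++ [e]))
      PySem.Dict.empty).keys.Nodup := by
    apply PySem.Dict.nodup_keys_foldl_modify_key
    simp [PySem.Dict.keys_empty]
  have hkeys : (logs.foldl (fun d e => d.modify (pyRoundKey e) [] (fun v => v ++ [e]))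
      PySem.Dict.empty).keys = PySem.Set.ofList (logs.map pyRoundKey) := by
    rw [PySem.Dict.keys_foldl_modify_key]
    rfl
  have hgetD : ∀ k, (logs.foldl (fun d e => d.modify (pyRoundKey e) [] (fun v => v ++ [e]))
      PySem.Dict.empty).getD k [] = logs.filter (fun e => pyRoundKey e == k) := by
    intro k
    have hfm : logs.foldl (fun d e => d.modify (pyRoundKey e) [] (fun v => v ++ [e]))
        PySem.Dict.empty
        = (logs.map (fun e => (pyRoundKey e, e))).foldl
            (fun d p => d.modify p.1 [] (fun v => v ++ [p.2])) PySem.Dict.empty := by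
      rw [List.foldl_map]
    rw [hfm, PySem.Dict.getD_foldl_modify_append, PySem.Dict.getD_empty, List.nil_append]
    rw [List.filter_map, List.map_map]
    simp [Function.comp_def]
  rw [PySem.Dict.items_eq_map_keys _ hnodup [], hkeys]
  apply List.map_congr_left
  intro k _
  rw [hgetD]

-- ===== VERDICT (by name: the statement is the Claim_ definition above) =====
theorem conversation_logs_by_round_spec : Claim_equal_conversation_logs_by_round := by
  intro results _ _
  unfold Spec_conversation_logs_by_round conversation_logs_by_round conversation_logs_by_round_alt
  simp only []
  set logs := (results.lookup "conversation_logs").getD [] with hlogs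
  set s := PySem.List.sorted logs pyRoundKey false with hsdef
  have hpair : s.Pairwise (fun a b => pyRoundKey a ≤ pyRoundKey b) :=
    PySem.List.sorted_pairwise logs pyRoundKey
  obtain ⟨h1, h2, h3⟩ := pv_groupRuns_char s hpair
  -- groupRuns s written as a map over its own key list
  have hmapself : groupRuns s
      = ((groupRuns s).map Prod.fst).map
          (fun k => (k, logs.filter (fun e => pyRoundKey e == k))) := by
    rw [List.map_map]
    symm
    have hid : ∀ p ∈ groupRuns s,
        ((fun k => (k, logs.filter (fun e => pyRoundKey e == k))) ∘ Prod.fst) p = p := by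
      intro p hp
      have hv := h1 p hp
      rw [hsdef, pv_sorted_filter] at hv
      simp only [Function.comp]
      exact Prod.ext rfl hv.symm
    calc (groupRuns s).map ((fun k => (k, logs.filter (fun e => pyRoundKey e == k))) ∘ Prod.fst)
        = (groupRuns s).map id := List.map_congr_left hid
      _ = groupRuns s := List.map_id _
  have hMnodup : ((groupRuns s).map Prod.fst).Nodup := by
    have : ((groupRuns s).map Prod.fst).Pairwise (· < ·) := List.pairwise_map.mpr h2
    exact this.imp (fun h => ne_of_lt h)
  have hkeysperm : ((groupRuns s).map Prod.fst).Perm (PySem.Set.ofList (logs.map pyRoundKey)) := by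
    rw [List.perm_ext_iff_of_nodup hMnodup (PySem.Set.nodup_ofList _)]
    intro k
    rw [h3, PySem.Set.mem_ofList]
    have hp : s.Perm logs := PySem.List.sorted_perm logs pyRoundKey false
    exact (hp.map pyRoundKey).mem_iff
  rw [pv_items_eq]
  refine PySem.List.sorted_eq_of_perm_of_pairwise_lt _ _
      (fun p : Int × List (List (String × String)) => p.1) ?_ ?_
  · rw [hmapself]
    exact hkeysperm.map _
  · exact h2
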